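-- pv_equiv track=rewrite | github.com/JanSkoupil86/scouting-app | pages/3_Compare.py | position_group
-- ===== SOURCE A (Python) =====
-- def position_group(main_pos: str) -> str:
--     if not main_pos:
--         return "Other"
--     p = str(main_pos).upper()
--
--     if "GK" in p:
--         return "Goalkeeper"
--     if any(x in p for x in ["CB", "LCB", "RCB"]):
--         return "Center Back"
--     if any(x in p for x in ["LB", "LWB"]):
--         return "Left Back/WB"
--     if any(x in p for x in ["RB", "RWB"]):
--         return "Right Back/WB"
--     if "DMF" in p:
--         return "Defensive Midfield"
--     if any(x in p for x in ["CMF", "LCMF", "RCMF"]):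
--         return "Center Midfield"
--     if "AMF" in p:
--         return "Attacking Midfield"
--     if any(x in p for x in ["LWF", "LW"]):
--         return "Left Wing"
--     if any(x in p for x in ["RWF", "RW"]):
--         return "Right Wing"
--     if any(x in p for x in ["CF", "ST", "SS"]):
--         return "Center Forward"
--     return "Other"
-- ===== SOURCE B (Python) =====
-- # One left-to-right scan over the string's 2/3/4-char windows with a token->
-- # (priority, label) table; the best (lowest-priority) hit wins.
-- _TOKENS = {
--     "GK": (0, "Goalkeeper"),
--     "CB": (1, "Center Back"), "LCB": (1, "Center Back"), "RCB": (1, "Center Back"),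
--     "LB": (2, "Left Back/WB"), "LWB": (2, "Left Back/WB"),
--     "RB": (3, "Right Back/WB"), "RWB": (3, "Right Back/WB"),
--     "DMF": (4, "Defensive Midfield"),
--     "CMF": (5, "Center Midfield"), "LCMF": (5, "Center Midfield"), "RCMF": (5, "Center Midfield"),
--     "AMF": (6, "Attacking Midfield"),
--     "LWF": (7, "Left Wing"), "LW": (7, "Left Wing"),
--     "RWF": (8, "Right Wing"), "RW": (8, "Right Wing"),
--     "CF": (9, "Center Forward"), "ST": (9, "Center Forward"), "SS": (9, "Center Forward"),
-- }
--
-- def position_group(main_pos: str) -> str: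
--     if not main_pos:
--         return "Other"
--     p = str(main_pos).upper()
--     best = None
--     for i in range(len(p)):
--         for L in (2, 3, 4):
--             hit = _TOKENS.get(p[i:i + L])
--             if hit is not None and (best is None or hit[0] < best[0]):
--                 best = hit
--     return best[1] if best else "Other"
-- ===== Notes on version B (the rewrite author's own statement) =====
-- stated objective: alternative
-- what changed: Instead of testing each group's substrings against the string with ten sequential if-branches, B makes a single left-to-right scan of the string's 2/3/4-character windows, looks each window up in a token->(priority,label) table, and keeps the hit with the lowest priority.
import Mathlib
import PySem

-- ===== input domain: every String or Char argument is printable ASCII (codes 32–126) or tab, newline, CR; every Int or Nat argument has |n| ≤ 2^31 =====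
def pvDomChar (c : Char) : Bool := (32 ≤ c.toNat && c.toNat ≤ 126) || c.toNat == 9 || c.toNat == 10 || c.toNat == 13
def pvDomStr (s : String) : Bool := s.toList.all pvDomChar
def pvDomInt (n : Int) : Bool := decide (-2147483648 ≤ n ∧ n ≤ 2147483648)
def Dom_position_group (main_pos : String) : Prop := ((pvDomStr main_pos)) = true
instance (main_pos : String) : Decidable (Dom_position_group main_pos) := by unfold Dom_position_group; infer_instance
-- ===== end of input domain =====

-- B replaces the ten-branch substring if-chain by one scan of the string's
-- 2/3/4-char windows against a token table, keeping the lowest-priority hit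
-- (objective: alternative algorithm, same result).

-- ===== PORT A =====
def position_group (main_pos : String) : String :=
  if main_pos = "" then "Other" else
  let p := PySem.Str.upper main_pos
  if PySem.Str.isIn "GK" p then "Goalkeeper" else
  if ["CB", "LCB", "RCB"].any (fun x => PySem.Str.isIn x p) then "Center Back" else
  if ["LB", "LWB"].any (fun x => PySem.Str.isIn x p) then "Left Back/WB" else
  if ["RB", "RWB"].any (fun x => PySem.Str.isIn x p) then "Right Back/WB" else
  if PySem.Str.isIn "DMF" p then "Defensive Midfield" else
  if ["CMF", "LCMF", "RCMF"].any (fun x => PySem.Str.isIn x p) then "Center Midfield" else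
  if PySem.Str.isIn "AMF" p then "Attacking Midfield" else
  if ["LWF", "LW"].any (fun x => PySem.Str.isIn x p) then "Left Wing" else
  if ["RWF", "RW"].any (fun x => PySem.Str.isIn x p) then "Right Wing" else
  if ["CF", "ST", "SS"].any (fun x => PySem.Str.isIn x p) then "Center Forward" else
  "Other"

-- ===== PORT B =====
-- token -> (priority, label), as in Source B's _TOKENS dict
def pgTokens : PySem.Dict String (Int × String) := PySem.Dict.ofList
  [("GK", (0, "Goalkeeper")),
   ("CB", (1, "Center Back")), ("LCB", (1, "Center Back")), ("RCB", (1, "Center Back")),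
   ("LB", (2, "Left Back/WB")), ("LWB", (2, "Left Back/WB")),
   ("RB", (3, "Right Back/WB")), ("RWB", (3, "Right Back/WB")),
   ("DMF", (4, "Defensive Midfield")),
   ("CMF", (5, "Center Midfield")), ("LCMF", (5, "Center Midfield")), ("RCMF", (5, "Center Midfield")),
   ("AMF", (6, "Attacking Midfield")),
   ("LWF", (7, "Left Wing")), ("LW", (7, "Left Wing")),
   ("RWF", (8, "Right Wing")), ("RW", (8, "Right Wing")),
   ("CF", (9, "Center Forward")), ("ST", (9, "Center Forward")), ("SS", (9, "Center Forward"))]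

def position_group_alt (main_pos : String) : String :=
  if main_pos = "" then "Other" else
  let p := PySem.Str.upper main_pos
  let best := (PySem.List.pyRange 0 (PySem.Str.len p) 1).foldl
    (fun best i =>
      ([2, 3, 4] : List Int).foldl
        (fun best L =>
          match pgTokens.get? (PySem.Str.slice p (some i) (some (i + L))) with
          | some hit => if best.all (fun b => hit.1 < b.1) then some hit else best
          | none => best)
        best)
    none
  match best with
  | some b => b.2
  | none => "Other"

-- ===== PRECONDITION & SPEC =====
def Spec_position_group (main_pos : String) (out : String) : Prop := out = position_group_alt main_pos
instance (main_pos : String) (out : String) : Decidable (Spec_position_group main_pos out) := by unfold Spec_position_group; infer_instance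

-- ===== CLAIM (what is proved, stated in full; the proofs are below) =====
def Claim_equal_position_group : Prop := ∀ (main_pos : String), Dom_position_group main_pos → Spec_position_group main_pos (position_group main_pos)

-- ===== LEMMAS AND PROOFS =====

-- proof-side tables: label and token list of each priority group
def pgLab (k : Int) : String :=
  if k = 0 then "Goalkeeper" else if k = 1 then "Center Back" else if k = 2 then "Left Back/WB"
  else if k = 3 then "Right Back/WB" else if k = 4 then "Defensive Midfield"
  else if k = 5 then "Center Midfield" else if k = 6 then "Attacking Midfield"
  else if k = 7 then "Left Wing" else if k = 8 then "Right Wing"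
  else if k = 9 then "Center Forward" else "Other"

def pgToks (k : Int) : List String :=
  if k = 0 then ["GK"] else if k = 1 then ["CB", "LCB", "RCB"] else if k = 2 then ["LB", "LWB"]
  else if k = 3 then ["RB", "RWB"] else if k = 4 then ["DMF"]
  else if k = 5 then ["CMF", "LCMF", "RCMF"] else if k = 6 then ["AMF"]
  else if k = 7 then ["LWF", "LW"] else if k = 8 then ["RWF", "RW"]
  else if k = 9 then ["CF", "ST", "SS"] else []

-- B's accumulator step, named
def pgComb (b : Option (Int × String)) (h : Int × String) : Option (Int × String) :=
  if b.all (fun x => h.1 < x.1) then some h else b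

-- all table hits produced by B's window scan, in scan order
def pgCands (p : String) : List (Int × String) :=
  (PySem.List.pyRange 0 (PySem.Str.len p) 1).flatMap
    (fun i => ([2, 3, 4] : List Int).filterMap
      (fun L => pgTokens.get? (PySem.Str.slice p (some i) (some (i + L)))))

def pgBest (q : String) : String :=
  (((pgCands q).foldl pgComb none).map Prod.snd).getD "Other"

lemma pg_foldl_filterMap {α β γ : Type} (f : α → Option β) (g : γ → β → γ) (ls : List α) (b : γ) :
    (ls.filterMap f).foldl g b =
      ls.foldl (fun acc a => match f a with | some h => g acc h | none => acc) b := by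
  induction ls generalizing b with
  | nil => rfl
  | cons a t ih => cases hfa : f a <;> simp [hfa, ih]

lemma pg_alt_eq_fold (s : String) (hs : ¬ s = "") :
    position_group_alt s = pgBest (PySem.Str.upper s) := by
  unfold position_group_alt
  rw [if_neg hs]
  have : (pgCands (PySem.Str.upper s)).foldl pgComb none =
      (PySem.List.pyRange 0 (PySem.Str.len (PySem.Str.upper s)) 1).foldl
        (fun best i =>
          ([2, 3, 4] : List Int).foldl
            (fun best L =>
              match pgTokens.get? (PySem.Str.slice (PySem.Str.upper s) (some i) (some (i + L))) with
              | some hit => if best.all (fun b => hit.1 < b.1) then some hit else best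
              | none => best)
            best)
        none := by
    unfold pgCands
    rw [List.foldl_flatMap]
    congr 1
    funext acc i
    rw [pg_foldl_filterMap]
    unfold pgComb
    congr 1
    funext b' L
    cases pgTokens.get? (PySem.Str.slice (PySem.Str.upper s) (some i) (some (i + L))) <;> rfl
  simp only [pgBest]
  rw [← this]
  cases hc : (pgCands (PySem.Str.upper s)).foldl pgComb none <;> simp [hc]

lemma pgComb_isSome (b : Option (Int × String)) (h : Int × String) : (pgComb b h).isSome := by
  cases b <;> simp [pgComb] <;> split <;> simp

lemma pg_fold_isSome (l : List (Int × String)) :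
    ∀ b : Option (Int × String), b.isSome → (l.foldl pgComb b).isSome := by
  induction l with
  | nil => intro b hb; simpa using hb
  | cons a t ih => intro b _; exact ih (pgComb b a) (pgComb_isSome b a)

lemma pg_fold_some (l : List (Int × String)) :
    ∀ (b : Option (Int × String)) (h : Int × String), l.foldl pgComb b = some h →
      (h ∈ l ∨ b = some h) ∧ (∀ x ∈ l, h.1 ≤ x.1) ∧ (∀ y, b = some y → h.1 ≤ y.1) := by
  induction l with
  | nil => intro b h hb; simp at hb; exact ⟨Or.inr hb, by simp, fun y hy => by rw [hb] at hy; simp_all⟩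
  | cons a t ih =>
    intro b h hfold
    simp only [List.foldl_cons] at hfold
    obtain ⟨hmem, hle, hb⟩ := ih (pgComb b a) h hfold
    have hcomb : ∀ y, pgComb b a = some y → y.1 ≤ a.1 := by
      intro y hy
      unfold pgComb at hy
      split at hy
      · cases hy; exact le_refl _
      · cases b with
        | none => simp_all
        | some x =>
          cases hy
          simp only [Option.all_some, decide_eq_true_eq] at *
          omega
    have hha : h.1 ≤ a.1 := by
      cases hcb : pgComb b a with
      | none => have := pgComb_isSome b a; rw [hcb] at this; simp at this
      | some y => exact le_trans (hb y hcb) (hcomb y hcb)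
    refine ⟨?_, ?_, ?_⟩
    · rcases hmem with hm | hm
      · exact Or.inl (List.mem_cons_of_mem a hm)
      · unfold pgComb at hm
        split at hm
        · cases hm; exact Or.inl (List.mem_cons_self)
        · exact Or.inr hm
    · intro x hx
      rcases List.mem_cons.mp hx with rfl | hx
      · exact hha
      · exact hle x hx
    · intro y hy
      subst hy
      have : pgComb (some y) a = some a ∨ pgComb (some y) a = some y := by
        unfold pgComb; split <;> simp
      rcases this with hc | hc
      · have := hb a hc
        unfold pgComb at hc
        split at hc
        · simp only [Option.all_some, decide_eq_true_eq] at *; omega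
        · cases hc; exact this
      · exact hb y hc

-- every table entry carries its group's label and its key is a token of that group
lemma pg_items_facts :
    ∀ pr ∈ pgTokens.items, pr.2.2 = pgLab pr.2.1 ∧ pr.1 ∈ pgToks pr.2.1 := by decide

lemma pg_toks_facts (k : Int) (t : String) (ht : t ∈ pgToks k) :
    (t.toList.length = 2 ∨ t.toList.length = 3 ∨ t.toList.length = 4) ∧
      pgTokens.get? t = some (k, pgLab k) ∧ 0 ≤ k ∧ k ≤ 9 := by
  unfold pgToks at ht
  split_ifs at ht with h0 h1 h2 h3 h4 h5 h6 h7 h8 h9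
  · subst h0; fin_cases ht <;> refine ⟨by decide, by decide, by omega⟩
  · subst h1; fin_cases ht <;> refine ⟨by decide, by decide, by omega⟩
  · subst h2; fin_cases ht <;> refine ⟨by decide, by decide, by omega⟩
  · subst h3; fin_cases ht <;> refine ⟨by decide, by decide, by omega⟩
  · subst h4; fin_cases ht <;> refine ⟨by decide, by decide, by omega⟩
  · subst h5; fin_cases ht <;> refine ⟨by decide, by decide, by omega⟩
  · subst h6; fin_cases ht <;> refine ⟨by decide, by decide, by omega⟩
  · subst h7; fin_cases ht <;> refine ⟨by decide, by decide, by omega⟩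
  · subst h8; fin_cases ht <;> refine ⟨by decide, by decide, by omega⟩
  · subst h9; fin_cases ht <;> refine ⟨by decide, by decide, by omega⟩
  · simp at ht

lemma pg_cands_sound (q : String) :
    ∀ h ∈ pgCands q, h.2 = pgLab h.1 ∧ ∃ t ∈ pgToks h.1, PySem.Str.isIn t q = true := by
  intro h hmem
  unfold pgCands at hmem
  rw [List.mem_flatMap] at hmem
  obtain ⟨i, hi, hmem⟩ := hmem
  rw [List.mem_filterMap] at hmem
  obtain ⟨L, hL, hget⟩ := hmem
  obtain ⟨hi0, _⟩ := PySem.List.mem_pyRange_one.mp hi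
  have hLpos : 0 < L := by fin_cases hL <;> norm_num
  have hitems := PySem.Dict.mem_items_of_get?_eq_some pgTokens hget
  have hfacts := pg_items_facts _ hitems
  refine ⟨hfacts.1, PySem.Str.slice q (some i) (some (i + L)), hfacts.2, ?_⟩
  rw [PySem.Str.isIn_iff_infix, PySem.Str.toList_slice, PySem.Chars.slice_eq_listSlice]
  rw [PySem.List.slice_toNat q.toList hi0 (by omega)]
  exact ((q.toList.drop i.toNat).take_prefix _).isInfix.trans (q.toList.drop_suffix i.toNat).isInfix

lemma pg_cands_complete (q : String) (k : Int) (t : String)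
    (ht : t ∈ pgToks k) (hin : PySem.Str.isIn t q = true) :
    ∃ h ∈ pgCands q, h.1 = k := by
  obtain ⟨hlen, hget, _⟩ := pg_toks_facts k t ht
  have hin' : PySem.Chars.isIn t.toList q.toList = true := by rw [← PySem.Str.isIn_eq]; exact hin
  obtain ⟨j, hpre⟩ := (PySem.Chars.exists_prefix_drop_iff_isIn t.toList q.toList).mpr hin'
  have htne : t.toList ≠ [] := by rcases hlen with h | h | h <;> (intro hnil; rw [hnil] at h; simp at h)
  have hjlt : j < q.toList.length := by
    by_contra hge
    push_neg at hge
    rw [List.drop_eq_nil_of_le hge] at hpre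
    exact htne (List.prefix_nil.mp hpre)
  refine ⟨(k, pgLab k), ?_, rfl⟩
  unfold pgCands
  rw [List.mem_flatMap]
  refine ⟨(j : Int), ?_, ?_⟩
  · rw [PySem.List.mem_pyRange_one, PySem.Str.len_eq]
    exact ⟨Int.natCast_nonneg j, by exact_mod_cast hjlt⟩
  · rw [List.mem_filterMap]
    refine ⟨(t.toList.length : Int), ?_, ?_⟩
    · rcases hlen with h | h | h <;> simp [h]
    · have hslice : PySem.Str.slice q (some (j : Int)) (some ((j : Int) + (t.toList.length : Int))) = t := by
        apply String.toList_inj.mp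
        rw [PySem.Str.toList_slice, PySem.Chars.slice_eq_listSlice, PySem.List.slice_natCast_add]
        exact (List.prefix_iff_eq_take.mp hpre).symm
      rw [hslice]
      exact hget

lemma pg_best_case (q : String) (k : Int)
    (hk : ∃ t ∈ pgToks k, PySem.Str.isIn t q = true)
    (hlow : ∀ j t, t ∈ pgToks j → j < k → PySem.Str.isIn t q ≠ true) :
    pgBest q = pgLab k := by
  obtain ⟨t, ht, hin⟩ := hk
  obtain ⟨h₀, h₀mem, h₀k⟩ := pg_cands_complete q k t ht hin
  unfold pgBest
  cases hbest : (pgCands q).foldl pgComb none with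
  | none =>
    exfalso
    cases hc : pgCands q with
    | nil => rw [hc] at h₀mem; simp at h₀mem
    | cons a s =>
      have := pg_fold_isSome s (pgComb none a) (pgComb_isSome none a)
      rw [hc] at hbest
      simp only [List.foldl_cons] at hbest
      rw [hbest] at this
      simp at this
  | some h =>
    obtain ⟨hmem, hle, _⟩ := pg_fold_some _ _ _ hbest
    have hmem' : h ∈ pgCands q := by
      rcases hmem with hm | hm
      · exact hm
      · exact absurd hm (by simp)
    have h1 : h.1 ≤ k := h₀k ▸ hle h₀ h₀mem
    obtain ⟨hlab, t', ht', hin'⟩ := pg_cands_sound q h hmem'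
    have h2 : ¬ h.1 < k := fun hlt => hlow h.1 t' ht' hlt hin'
    have hk' : h.1 = k := by omega
    simp [hlab, hk']

lemma pg_best_other (q : String)
    (hlow : ∀ j t, t ∈ pgToks j → PySem.Str.isIn t q ≠ true) :
    pgBest q = "Other" := by
  have hnil : pgCands q = [] := by
    cases hc : pgCands q with
    | nil => rfl
    | cons a s =>
      exfalso
      have hmem : a ∈ pgCands q := by rw [hc]; exact List.mem_cons_self
      obtain ⟨_, t', ht', hin'⟩ := pg_cands_sound q a hmem
      exact hlow a.1 t' ht' hin'
  unfold pgBest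
  rw [hnil]
  rfl

lemma pg_chain (q : String) :
    pgBest q =
      (if PySem.Str.isIn "GK" q then "Goalkeeper" else
       if ["CB", "LCB", "RCB"].any (fun x => PySem.Str.isIn x q) then "Center Back" else
       if ["LB", "LWB"].any (fun x => PySem.Str.isIn x q) then "Left Back/WB" else
       if ["RB", "RWB"].any (fun x => PySem.Str.isIn x q) then "Right Back/WB" else
       if PySem.Str.isIn "DMF" q then "Defensive Midfield" else
       if ["CMF", "LCMF", "RCMF"].any (fun x => PySem.Str.isIn x q) then "Center Midfield" else
       if PySem.Str.isIn "AMF" q then "Attacking Midfield" else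
       if ["LWF", "LW"].any (fun x => PySem.Str.isIn x q) then "Left Wing" else
       if ["RWF", "RW"].any (fun x => PySem.Str.isIn x q) then "Right Wing" else
       if ["CF", "ST", "SS"].any (fun x => PySem.Str.isIn x q) then "Center Forward" else
       "Other") := by
  by_cases c0 : (PySem.Str.isIn "GK" q) = true
  · rw [if_pos c0]
    refine pg_best_case q 0 ⟨"GK", by simp [pgToks], c0⟩ ?_
    intro j t htj hjk hin
    obtain ⟨hb0, hb1⟩ := (pg_toks_facts j t htj).2.2
    omega
  · rw [if_neg c0]
    rw [Bool.not_eq_true] at c0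
    by_cases c1 : (["CB", "LCB", "RCB"].any (fun x => PySem.Str.isIn x q)) = true
    · rw [if_pos c1]
      simp only [List.any_eq_true] at c1
      obtain ⟨x, hx, hxin⟩ := c1
      refine pg_best_case q 1 ⟨x, by simpa [pgToks] using hx, hxin⟩ ?_
      intro j t htj hjk hin
      obtain ⟨hb0, hb1⟩ := (pg_toks_facts j t htj).2.2
      interval_cases j <;>
        simp [pgToks] at htj <;>
        (first | (rcases htj with rfl | rfl | rfl) | (rcases htj with rfl | rfl) | (subst htj)) <;>
        simp_all
    · rw [if_neg c1]
      rw [Bool.not_eq_true] at c1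
      simp only [List.any_eq_false, List.mem_cons, List.not_mem_nil, or_false, forall_eq_or_imp, forall_eq] at c1
      by_cases c2 : (["LB", "LWB"].any (fun x => PySem.Str.isIn x q)) = true
      · rw [if_pos c2]
        simp only [List.any_eq_true] at c2
        obtain ⟨x, hx, hxin⟩ := c2
        refine pg_best_case q 2 ⟨x, by simpa [pgToks] using hx, hxin⟩ ?_
        intro j t htj hjk hin
        obtain ⟨hb0, hb1⟩ := (pg_toks_facts j t htj).2.2
        interval_cases j <;>
          simp [pgToks] at htj <;>
          (first | (rcases htj with rfl | rfl | rfl) | (rcases htj with rfl | rfl) | (subst htj)) <;>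
          simp_all
      · rw [if_neg c2]
        rw [Bool.not_eq_true] at c2
        simp only [List.any_eq_false, List.mem_cons, List.not_mem_nil, or_false, forall_eq_or_imp, forall_eq] at c2
        by_cases c3 : (["RB", "RWB"].any (fun x => PySem.Str.isIn x q)) = true
        · rw [if_pos c3]
          simp only [List.any_eq_true] at c3
          obtain ⟨x, hx, hxin⟩ := c3
          refine pg_best_case q 3 ⟨x, by simpa [pgToks] using hx, hxin⟩ ?_
          intro j t htj hjk hin
          obtain ⟨hb0, hb1⟩ := (pg_toks_facts j t htj).2.2
          interval_cases j <;>
            simp [pgToks] at htj <;>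
            (first | (rcases htj with rfl | rfl | rfl) | (rcases htj with rfl | rfl) | (subst htj)) <;>
            simp_all
        · rw [if_neg c3]
          rw [Bool.not_eq_true] at c3
          simp only [List.any_eq_false, List.mem_cons, List.not_mem_nil, or_false, forall_eq_or_imp, forall_eq] at c3
          by_cases c4 : (PySem.Str.isIn "DMF" q) = true
          · rw [if_pos c4]
            refine pg_best_case q 4 ⟨"DMF", by simp [pgToks], c4⟩ ?_
            intro j t htj hjk hin
            obtain ⟨hb0, hb1⟩ := (pg_toks_facts j t htj).2.2
            interval_cases j <;>
              simp [pgToks] at htj <;>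
              (first | (rcases htj with rfl | rfl | rfl) | (rcases htj with rfl | rfl) | (subst htj)) <;>
              simp_all
          · rw [if_neg c4]
            rw [Bool.not_eq_true] at c4
            by_cases c5 : (["CMF", "LCMF", "RCMF"].any (fun x => PySem.Str.isIn x q)) = true
            · rw [if_pos c5]
              simp only [List.any_eq_true] at c5
              obtain ⟨x, hx, hxin⟩ := c5
              refine pg_best_case q 5 ⟨x, by simpa [pgToks] using hx, hxin⟩ ?_
              intro j t htj hjk hin
              obtain ⟨hb0, hb1⟩ := (pg_toks_facts j t htj).2.2
              interval_cases j <;>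
                simp [pgToks] at htj <;>
                (first | (rcases htj with rfl | rfl | rfl) | (rcases htj with rfl | rfl) | (subst htj)) <;>
                simp_all
            · rw [if_neg c5]
              rw [Bool.not_eq_true] at c5
              simp only [List.any_eq_false, List.mem_cons, List.not_mem_nil, or_false, forall_eq_or_imp, forall_eq] at c5
              by_cases c6 : (PySem.Str.isIn "AMF" q) = true
              · rw [if_pos c6]
                refine pg_best_case q 6 ⟨"AMF", by simp [pgToks], c6⟩ ?_
                intro j t htj hjk hin
                obtain ⟨hb0, hb1⟩ := (pg_toks_facts j t htj).2.2
                interval_cases j <;>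
                  simp [pgToks] at htj <;>
                  (first | (rcases htj with rfl | rfl | rfl) | (rcases htj with rfl | rfl) | (subst htj)) <;>
                  simp_all
              · rw [if_neg c6]
                rw [Bool.not_eq_true] at c6
                by_cases c7 : (["LWF", "LW"].any (fun x => PySem.Str.isIn x q)) = true
                · rw [if_pos c7]
                  simp only [List.any_eq_true] at c7
                  obtain ⟨x, hx, hxin⟩ := c7
                  refine pg_best_case q 7 ⟨x, by simpa [pgToks] using hx, hxin⟩ ?_
                  intro j t htj hjk hin
                  obtain ⟨hb0, hb1⟩ := (pg_toks_facts j t htj).2.2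
                  interval_cases j <;>
                    simp [pgToks] at htj <;>
                    (first | (rcases htj with rfl | rfl | rfl) | (rcases htj with rfl | rfl) | (subst htj)) <;>
                    simp_all
                · rw [if_neg c7]
                  rw [Bool.not_eq_true] at c7
                  simp only [List.any_eq_false, List.mem_cons, List.not_mem_nil, or_false, forall_eq_or_imp, forall_eq] at c7
                  by_cases c8 : (["RWF", "RW"].any (fun x => PySem.Str.isIn x q)) = true
                  · rw [if_pos c8]
                    simp only [List.any_eq_true] at c8
                    obtain ⟨x, hx, hxin⟩ := c8
                    refine pg_best_case q 8 ⟨x, by simpa [pgToks] using hx, hxin⟩ ?_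
                    intro j t htj hjk hin
                    obtain ⟨hb0, hb1⟩ := (pg_toks_facts j t htj).2.2
                    interval_cases j <;>
                      simp [pgToks] at htj <;>
                      (first | (rcases htj with rfl | rfl | rfl) | (rcases htj with rfl | rfl) | (subst htj)) <;>
                      simp_all
                  · rw [if_neg c8]
                    rw [Bool.not_eq_true] at c8
                    simp only [List.any_eq_false, List.mem_cons, List.not_mem_nil, or_false, forall_eq_or_imp, forall_eq] at c8
                    by_cases c9 : (["CF", "ST", "SS"].any (fun x => PySem.Str.isIn x q)) = true
                    · rw [if_pos c9]
                      simp only [List.any_eq_true] at c9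
                      obtain ⟨x, hx, hxin⟩ := c9
                      refine pg_best_case q 9 ⟨x, by simpa [pgToks] using hx, hxin⟩ ?_
                      intro j t htj hjk hin
                      obtain ⟨hb0, hb1⟩ := (pg_toks_facts j t htj).2.2
                      interval_cases j <;>
                        simp [pgToks] at htj <;>
                        (first | (rcases htj with rfl | rfl | rfl) | (rcases htj with rfl | rfl) | (subst htj)) <;>
                        simp_all
                    · rw [if_neg c9]
                      rw [Bool.not_eq_true] at c9
                      simp only [List.any_eq_false, List.mem_cons, List.not_mem_nil, or_false, forall_eq_or_imp, forall_eq] at c9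
                      apply pg_best_other
                      intro j t htj hin
                      obtain ⟨hb0, hb1⟩ := (pg_toks_facts j t htj).2.2
                      have hjk : j < 10 := by omega
                      interval_cases j <;>
                        simp [pgToks] at htj <;>
                        (first | (rcases htj with rfl | rfl | rfl) | (rcases htj with rfl | rfl) | (subst htj)) <;>
                        simp_all

-- ===== VERDICT (by name: the statement is the Claim_ definition above) =====
theorem position_group_spec : Claim_equal_position_group := by
  intro s _
  unfold Spec_position_group
  by_cases hs : s = ""
  · subst hs; rfl
  · rw [pg_alt_eq_fold s hs, pg_chain]
    unfold position_group
    rw [if_neg hs]
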